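-- pv_equiv track=rewrite | github.com/yemaney/yemaney.github.io | DSA/arrays/LongestPeak.py | longestPeak1
-- ===== SOURCE A (Python) =====
-- def longestPeak1(array: list) -> int:
--     """
--     Traverse array from left to right. If an upward slope, a peak, and a downward
--     slope are found in order record lengths. Return max length found.
--
--     time: O(n) -> traversing entire array
--     space: O(1) -> only storing pointers and length int
--     """
--
--     peakLength = 0
--
--     for i in range(len(array) - 2):
--         start = i
--         currentLength = 1
--         upSlope, downSlope = False, False
--
--         while array[start] < array[start + 1]:
--             upSlope = True
--             start += 1
--             currentLength += 1
--             if start + 1 == len(array):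
--                 break
--
--         if start + 1 == len(array) or currentLength < 2:
--             continue
--
--         while array[start] > array[start + 1]:
--             downSlope = True
--             start += 1
--             currentLength += 1
--             if start + 1 == len(array):
--                 break
--
--         if currentLength >= 3 and currentLength > peakLength and upSlope and downSlope:
--             peakLength = currentLength
--
--     return peakLength
-- ===== SOURCE B (Python) =====
-- def longestPeak1(array: list) -> int:
--     """Single pass over peak tips: for each tip, expand left and right once.
--     Amortized O(n) time, O(1) space."""
--     n = len(array)
--     best = 0
--     for t in range(1, n - 1):
--         if array[t - 1] < array[t] and array[t] > array[t + 1]: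
--             l = t - 1
--             while l > 0 and array[l - 1] < array[l]:
--                 l -= 1
--             r = t + 1
--             while r < n - 1 and array[r] > array[r + 1]:
--                 r += 1
--             length = r - l + 1
--             if length > best:
--                 best = length
--     return best
-- ===== Notes on version B (the rewrite author's own statement) =====
-- stated objective: faster
-- what changed: A re-scans the whole up-then-down run from every single start index (quadratic on monotone runs); B makes one pass that detects each peak tip array[t-1]<array[t]>array[t+1] and expands left and right exactly once per tip, which is amortized linear.
import Mathlib
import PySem

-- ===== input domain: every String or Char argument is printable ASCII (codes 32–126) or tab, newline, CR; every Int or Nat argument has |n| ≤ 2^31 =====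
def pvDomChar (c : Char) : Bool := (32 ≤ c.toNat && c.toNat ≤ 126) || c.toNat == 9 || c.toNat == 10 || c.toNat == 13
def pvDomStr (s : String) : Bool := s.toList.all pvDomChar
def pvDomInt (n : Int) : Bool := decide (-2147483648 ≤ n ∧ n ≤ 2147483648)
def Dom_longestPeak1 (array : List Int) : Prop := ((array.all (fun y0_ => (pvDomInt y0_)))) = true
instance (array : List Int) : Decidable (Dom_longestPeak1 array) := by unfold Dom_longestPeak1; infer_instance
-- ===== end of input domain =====

-- B replaces A's per-start quadratic rescans by a single pass that expands once around each
-- peak tip (amortized O(n)); the objective is an asymptotic speed-up.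

-- ===== PORT A =====
-- A's inner `while array[start] < array[start+1]` loop; state (start, currentLength, upSlope).
-- The `start + 1 < array.length` guard is for termination only: Python reads array[start+1]
-- there, and on every reachable state the index is in range, so the guard is always true.
def pvA_up (array : List Int) (start c : Nat) (up : Bool) : Nat × Nat × Bool :=
  if h : start + 1 < array.length then
    if array.getD start 0 < array.getD (start + 1) 0 then
      if start + 1 + 1 = array.length then (start + 1, c + 1, true)
      else pvA_up array (start + 1) (c + 1) true
    else (start, c, up)
  else (start, c, up)
termination_by array.length - start

-- A's inner `while array[start] > array[start+1]` loop; same shape, state (start, currentLength, downSlope).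
def pvA_down (array : List Int) (start c : Nat) (down : Bool) : Nat × Nat × Bool :=
  if h : start + 1 < array.length then
    if array.getD start 0 > array.getD (start + 1) 0 then
      if start + 1 + 1 = array.length then (start + 1, c + 1, true)
      else pvA_down array (start + 1) (c + 1) true
    else (start, c, down)
  else (start, c, down)
termination_by array.length - start

def longestPeak1 (array : List Int) : Int :=
  ((List.range (array.length - 2)).foldl (fun peakLength i =>
    let s1 := pvA_up array i 1 false
    if s1.1 + 1 = array.length ∨ s1.2.1 < 2 then peakLength
    else
      let s2 := pvA_down array s1.1 s1.2.1 false
      if 3 ≤ s2.2.1 ∧ peakLength < s2.2.1 ∧ s1.2.2 = true ∧ s2.2.2 = true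
      then s2.2.1 else peakLength) 0 : Nat)

-- ===== PORT B =====
-- B's left expansion: `while l > 0 and array[l-1] < array[l]: l -= 1`.
def pvB_left (array : List Int) (l : Nat) : Nat :=
  if h : 0 < l ∧ array.getD (l - 1) 0 < array.getD l 0 then pvB_left array (l - 1) else l
termination_by l

-- B's right expansion: `while r < n - 1 and array[r] > array[r+1]: r += 1`.
def pvB_right (array : List Int) (r : Nat) : Nat :=
  if h : r + 1 < array.length ∧ array.getD r 0 > array.getD (r + 1) 0 then pvB_right array (r + 1)
  else r
termination_by array.length - r

def longestPeak1_alt (array : List Int) : Int :=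
  ((List.range' 1 (array.length - 2)).foldl (fun best t =>
    if array.getD (t - 1) 0 < array.getD t 0 ∧ array.getD t 0 > array.getD (t + 1) 0 then
      let l := pvB_left array (t - 1)
      let r := pvB_right array (t + 1)
      if best < r - l + 1 then r - l + 1 else best
    else best) 0 : Nat)

-- ===== PRECONDITION & SPEC =====
def Spec_longestPeak1 (array : List Int) (out : Int) : Prop := out = longestPeak1_alt array
instance (array : List Int) (out : Int) : Decidable (Spec_longestPeak1 array out) := by unfold Spec_longestPeak1; infer_instance

-- ===== CLAIM (what is proved, stated in full; the proofs are below) =====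
def Claim_equal_longestPeak1 : Prop := ∀ (array : List Int), Dom_longestPeak1 array → Spec_longestPeak1 array (longestPeak1 array)

-- ===== LEMMAS AND PROOFS =====

-- Length of the maximal strict ascent starting at i.
def ascN (array : List Int) (i : Nat) : Nat :=
  if h : i + 1 < array.length ∧ array.getD i 0 < array.getD (i + 1) 0 then ascN array (i + 1) + 1
  else 0
termination_by array.length - i

-- Length of the maximal strict descent starting at i.
def descN (array : List Int) (i : Nat) : Nat :=
  if h : i + 1 < array.length ∧ array.getD i 0 > array.getD (i + 1) 0 then descN array (i + 1) + 1
  else 0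
termination_by array.length - i

-- Length of the maximal strict ascent ending at t (looking left).
def lascN (array : List Int) (t : Nat) : Nat :=
  if h : 0 < t ∧ array.getD (t - 1) 0 < array.getD t 0 then lascN array (t - 1) + 1 else 0
termination_by t


-- ascN never runs past the end of the array.
theorem asc_add_lt (array : List Int) : ∀ k i, array.length - i = k → i < array.length →
    i + ascN array i < array.length := by
  intro k
  induction k with
  | zero => intro i hk hi; exact absurd hi (by omega)
  | succ k ih =>
    intro i hk hi
    rw [ascN]
    split_ifs with h
    · have := ih (i + 1) (by omega) h.1
      omega
    · omega

theorem lascN_le (array : List Int) : ∀ t, lascN array t ≤ t := by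
  intro t
  induction t with
  | zero => rw [lascN]; simp
  | succ t ih =>
    rw [lascN]
    simp only [Nat.add_sub_cancel]
    split_ifs with h <;> omega

theorem asc_pos_iff (array : List Int) (i : Nat) :
    0 < ascN array i ↔ (i + 1 < array.length ∧ array.getD i 0 < array.getD (i + 1) 0) := by
  rw [ascN]
  split_ifs with h
  · exact iff_of_true (Nat.succ_pos _) h
  · exact iff_of_false (lt_irrefl 0) h

theorem desc_pos_iff (array : List Int) (i : Nat) :
    0 < descN array i ↔ (i + 1 < array.length ∧ array.getD i 0 > array.getD (i + 1) 0) := by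
  rw [descN]
  split_ifs with h
  · exact iff_of_true (Nat.succ_pos _) h
  · exact iff_of_false (lt_irrefl 0) h

theorem desc_succ (array : List Int) (i : Nat) (h1 : i + 1 < array.length)
    (h2 : array.getD i 0 > array.getD (i + 1) 0) :
    descN array i = descN array (i + 1) + 1 := by
  rw [descN, dif_pos ⟨h1, h2⟩]

theorem lasc_succ (array : List Int) (t : Nat) (h1 : 0 < t)
    (h2 : array.getD (t - 1) 0 < array.getD t 0) :
    lascN array t = lascN array (t - 1) + 1 := by
  rw [lascN, dif_pos ⟨h1, h2⟩]

-- A's up-loop computes ascN.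
theorem up_eq (array : List Int) : ∀ k start c up, array.length - start = k →
    start + 1 ≤ array.length →
    pvA_up array start c up =
      (start + ascN array start, c + ascN array start, up || decide (0 < ascN array start)) := by
  intro k
  induction k with
  | zero => intro start c up hk hs; exact absurd hs (by omega)
  | succ k ih =>
    intro start c up hk hs
    by_cases h1 : start + 1 < array.length
    · by_cases h2 : array.getD start 0 < array.getD (start + 1) 0
      · have ha : ascN array start = ascN array (start + 1) + 1 := by
          rw [ascN, dif_pos ⟨h1, h2⟩]
        by_cases h3 : start + 1 + 1 = array.length
        · have hz : ascN array (start + 1) = 0 := by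
            rw [ascN, dif_neg (by rintro ⟨hc, _⟩; omega)]
          rw [pvA_up, dif_pos h1, if_pos h2, if_pos h3, ha, hz]
          simp
        · rw [pvA_up, dif_pos h1, if_pos h2, if_neg h3,
              ih (start + 1) (c + 1) true (by omega) (by omega), ha]
          simp only [Prod.mk.injEq]
          refine ⟨by omega, by omega, by simp⟩
      · have hz : ascN array start = 0 := by
          rw [ascN, dif_neg (by rintro ⟨_, hc⟩; exact h2 hc)]
        rw [pvA_up, dif_pos h1, if_neg h2, hz]
        simp
    · have hz : ascN array start = 0 := by
        rw [ascN, dif_neg (by rintro ⟨hc, _⟩; exact h1 hc)]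
      rw [pvA_up, dif_neg h1, hz]
      simp

-- A's down-loop computes descN.
theorem down_eq (array : List Int) : ∀ k start c down, array.length - start = k →
    start + 1 ≤ array.length →
    pvA_down array start c down =
      (start + descN array start, c + descN array start, down || decide (0 < descN array start)) := by
  intro k
  induction k with
  | zero => intro start c down hk hs; exact absurd hs (by omega)
  | succ k ih =>
    intro start c down hk hs
    by_cases h1 : start + 1 < array.length
    · by_cases h2 : array.getD start 0 > array.getD (start + 1) 0
      · have ha : descN array start = descN array (start + 1) + 1 := by
          rw [descN, dif_pos ⟨h1, h2⟩]
        by_cases h3 : start + 1 + 1 = array.length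
        · have hz : descN array (start + 1) = 0 := by
            rw [descN, dif_neg (by rintro ⟨hc, _⟩; omega)]
          rw [pvA_down, dif_pos h1, if_pos h2, if_pos h3, ha, hz]
          simp
        · rw [pvA_down, dif_pos h1, if_pos h2, if_neg h3,
              ih (start + 1) (c + 1) true (by omega) (by omega), ha]
          simp only [Prod.mk.injEq]
          refine ⟨by omega, by omega, by simp⟩
      · have hz : descN array start = 0 := by
          rw [descN, dif_neg (by rintro ⟨_, hc⟩; exact h2 hc)]
        rw [pvA_down, dif_pos h1, if_neg h2, hz]
        simp
    · have hz : descN array start = 0 := by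
        rw [descN, dif_neg (by rintro ⟨hc, _⟩; exact h1 hc)]
      rw [pvA_down, dif_neg h1, hz]
      simp

-- B's left expansion computes lascN.
theorem left_eq (array : List Int) : ∀ l, pvB_left array l = l - lascN array l := by
  intro l
  induction l with
  | zero => rw [pvB_left, lascN]; simp
  | succ l ih =>
    rw [pvB_left, lascN]
    split_ifs with h
    · simp only [Nat.add_sub_cancel]
      rw [ih]
      have := lascN_le array l
      omega
    · simp

-- B's right expansion computes descN.
theorem right_eq (array : List Int) : ∀ k r, array.length - r = k →
    pvB_right array r = r + descN array r := by
  intro k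
  induction k with
  | zero =>
    intro r hk
    have hz : descN array r = 0 := by
      rw [descN, dif_neg (by rintro ⟨hc, _⟩; omega)]
    rw [pvB_right, dif_neg (by rintro ⟨hc, _⟩; omega), hz]
    simp
  | succ k ih =>
    intro r hk
    rw [pvB_right, descN]
    split_ifs with h
    · rw [ih (r + 1) (by omega)]
      omega
    · simp

-- Every step of the maximal ascent from i really ascends.
theorem asc_chain (array : List Int) : ∀ j i, j < ascN array i →
    array.getD (i + j) 0 < array.getD (i + j + 1) 0 := by
  intro j
  induction j with
  | zero =>
    intro i hj
    have h := (asc_pos_iff array i).1 (by omega)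
    simpa using h.2
  | succ j ih =>
    intro i hj
    have hpos : 0 < ascN array i := by omega
    have hc := (asc_pos_iff array i).1 hpos
    have ha : ascN array i = ascN array (i + 1) + 1 := by
      rw [ascN, dif_pos ⟨hc.1, hc.2⟩]
    have := ih (i + 1) (by omega)
    have e1 : i + (j + 1) = i + 1 + j := by omega
    rw [e1]
    exact this

-- A strict ascending chain of length k ending at t forces lascN t ≥ k.
theorem lasc_ge (array : List Int) : ∀ k t, k ≤ t →
    (∀ j, j < k → array.getD (t - j - 1) 0 < array.getD (t - j) 0) →
    k ≤ lascN array t := by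
  intro k
  induction k with
  | zero => intro t _ _; omega
  | succ k ih =>
    intro t hkt hch
    have h0 := hch 0 (by omega)
    simp only [Nat.sub_zero] at h0
    have hstep := lasc_succ array t (by omega) h0
    have hpre : ∀ j, j < k → array.getD (t - 1 - j - 1) 0 < array.getD (t - 1 - j) 0 := by
      intro j hj
      have := hch (j + 1) (by omega)
      have e1 : t - (j + 1) - 1 = t - 1 - j - 1 := by omega
      have e2 : t - (j + 1) = t - 1 - j := by omega
      rw [e1, e2] at this
      exact this
    have := ih (t - 1) (by omega) hpre
    omega

-- Walking back the maximal left ascent and ascending again lands at t.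
theorem lasc_to_asc (array : List Int) : ∀ m t, t < array.length → lascN array t = m →
    ascN array (t - m) = m + ascN array t := by
  intro m
  induction m with
  | zero => intro t _ hm; simp
  | succ m ih =>
    intro t ht hm
    have hc : 0 < t ∧ array.getD (t - 1) 0 < array.getD t 0 := by
      by_contra hc
      rw [lascN, dif_neg hc] at hm
      omega
    have hm' : lascN array (t - 1) = m := by
      rw [lasc_succ array t hc.1 hc.2] at hm
      omega
    have ha : ascN array (t - 1) = ascN array t + 1 := by
      have e : t - 1 + 1 = t := by omega
      rw [ascN, dif_pos (by rw [e]; exact ⟨ht, hc.2⟩)]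
      rw [e]
    have := ih (t - 1) (by omega) hm'
    have hle := lascN_le array (t - 1)
    have e2 : t - (m + 1) = t - 1 - m := by omega
    rw [e2, this, ha]
    omega

-- Generic bounded-max fold lemmas.
theorem condmax_le_iff (p : Nat → Prop) [DecidablePred p] (f : Nat → Nat) :
    ∀ (l : List Nat) (b c : Nat),
    l.foldl (fun acc i => if p i then max acc (f i) else acc) b ≤ c ↔
      b ≤ c ∧ ∀ i ∈ l, p i → f i ≤ c := by
  intro l
  induction l with
  | nil => intro b c; simp
  | cons x xs ih =>
    intro b c
    simp only [List.foldl_cons, List.mem_cons]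
    split_ifs with hp
    · rw [ih]
      simp only [max_le_iff]
      constructor
      · rintro ⟨⟨hb, hf⟩, hall⟩
        exact ⟨hb, by rintro i (rfl | hi) hpi; exacts [hf, hall i hi hpi]⟩
      · rintro ⟨hb, hall⟩
        exact ⟨⟨hb, hall x (Or.inl rfl) hp⟩, fun i hi hpi => hall i (Or.inr hi) hpi⟩
    · rw [ih]
      constructor
      · rintro ⟨hb, hall⟩
        exact ⟨hb, by rintro i (rfl | hi) hpi; exacts [absurd hpi hp, hall i hi hpi]⟩
      · rintro ⟨hb, hall⟩
        exact ⟨hb, fun i hi hpi => hall i (Or.inr hi) hpi⟩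

theorem le_condmax (p : Nat → Prop) [DecidablePred p] (f : Nat → Nat)
    (l : List Nat) (b : Nat) {i : Nat} (hi : i ∈ l) (hp : p i) :
    f i ≤ l.foldl (fun acc i => if p i then max acc (f i) else acc) b := by
  have := (condmax_le_iff p f l b _).1 le_rfl
  exact this.2 i hi hp


-- A's loop body, rewritten through ascN/descN.
theorem bodyA_eq (array : List Int) (acc i : Nat) (hi : i < array.length - 2) :
    (let s1 := pvA_up array i 1 false;
     if s1.1 + 1 = array.length ∨ s1.2.1 < 2 then acc
     else
       let s2 := pvA_down array s1.1 s1.2.1 false;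
       if 3 ≤ s2.2.1 ∧ acc < s2.2.1 ∧ s1.2.2 = true ∧ s2.2.2 = true then s2.2.1 else acc)
    = if 0 < ascN array i ∧ 0 < descN array (i + ascN array i)
      then max acc (1 + ascN array i + descN array (i + ascN array i)) else acc := by
  have hup := up_eq array (array.length - i) i 1 false rfl (by omega)
  rw [hup]
  dsimp only
  by_cases hk : 0 < ascN array i
  · by_cases he : i + ascN array i + 1 = array.length
    · have hd0 : descN array (i + ascN array i) = 0 := by
        rw [descN, dif_neg (by rintro ⟨hc, _⟩; omega)]
      rw [if_pos (Or.inl he), if_neg (by rintro ⟨_, hh⟩; omega)]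
    · have htlt : i + ascN array i < array.length :=
        asc_add_lt array (array.length - i) i rfl (by omega)
      have hdown := down_eq array (array.length - (i + ascN array i)) (i + ascN array i)
        (1 + ascN array i) false rfl (by omega)
      rw [if_neg (by omega : ¬(i + ascN array i + 1 = array.length ∨ 1 + ascN array i < 2))]
      rw [hdown]
      dsimp only
      simp only [Bool.false_or, decide_eq_true_eq]
      split_ifs with h1 h2 <;> omega
  · rw [if_pos (Or.inr (by omega)), if_neg (by rintro ⟨hh, _⟩; omega)]

-- B's loop body, rewritten through lascN/descN.
theorem bodyB_eq (array : List Int) (acc t : Nat) (h1 : 1 ≤ t) (h2 : t < array.length - 1) :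
    (if array.getD (t - 1) 0 < array.getD t 0 ∧ array.getD t 0 > array.getD (t + 1) 0 then
       let l := pvB_left array (t - 1);
       let r := pvB_right array (t + 1);
       if acc < r - l + 1 then r - l + 1 else acc
     else acc)
    = if array.getD (t - 1) 0 < array.getD t 0 ∧ array.getD t 0 > array.getD (t + 1) 0 then
        max acc (lascN array t + descN array t + 1) else acc := by
  split_ifs with hc
  · have hl := left_eq array (t - 1)
    have hr := right_eq array (array.length - (t + 1)) (t + 1) rfl
    have hlasc : lascN array t = lascN array (t - 1) + 1 := lasc_succ array t (by omega) hc.1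
    have hdesc : descN array t = descN array (t + 1) + 1 := desc_succ array t (by omega) hc.2
    have hle := lascN_le array (t - 1)
    rw [hl, hr]
    dsimp only
    have e : t + 1 + descN array (t + 1) - (t - 1 - lascN array (t - 1)) + 1
        = lascN array t + descN array t + 1 := by omega
    rw [e]
    split_ifs with h <;> omega
  · rfl

-- ===== VERDICT (by name: the statement is the Claim_ definition above) =====
theorem longestPeak1_spec : Claim_equal_longestPeak1 := by
  intro array _
  unfold Spec_longestPeak1 longestPeak1 longestPeak1_alt
  congr 1
  have hA : (List.range (array.length - 2)).foldl (fun peakLength i =>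
      let s1 := pvA_up array i 1 false
      if s1.1 + 1 = array.length ∨ s1.2.1 < 2 then peakLength
      else
        let s2 := pvA_down array s1.1 s1.2.1 false
        if 3 ≤ s2.2.1 ∧ peakLength < s2.2.1 ∧ s1.2.2 = true ∧ s2.2.2 = true
        then s2.2.1 else peakLength) 0
      = (List.range (array.length - 2)).foldl (fun acc i =>
          if 0 < ascN array i ∧ 0 < descN array (i + ascN array i)
          then max acc (1 + ascN array i + descN array (i + ascN array i)) else acc) 0 :=
    PySem.List.foldl_congr_mem _ _ _ 0 (fun acc x hx => bodyA_eq array acc x (List.mem_range.1 hx))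
  have hB : (List.range' 1 (array.length - 2)).foldl (fun best t =>
      if array.getD (t - 1) 0 < array.getD t 0 ∧ array.getD t 0 > array.getD (t + 1) 0 then
        let l := pvB_left array (t - 1)
        let r := pvB_right array (t + 1)
        if best < r - l + 1 then r - l + 1 else best
      else best) 0
      = (List.range' 1 (array.length - 2)).foldl (fun acc t =>
          if array.getD (t - 1) 0 < array.getD t 0 ∧ array.getD t 0 > array.getD (t + 1) 0
          then max acc (lascN array t + descN array t + 1) else acc) 0 :=
    PySem.List.foldl_congr_mem _ _ _ 0 (fun acc x hx => by
      have hx' := List.mem_range'_1.1 hx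
      exact bodyB_eq array acc x hx'.1 (by omega))
  rw [hA, hB]
  apply le_antisymm
  · rw [condmax_le_iff]
    refine ⟨Nat.zero_le _, ?_⟩
    intro i hi hp
    obtain ⟨hk, hd⟩ := hp
    have hdc := (desc_pos_iff array (i + ascN array i)).1 hd
    have htip1 : array.getD (i + ascN array i - 1) 0 < array.getD (i + ascN array i) 0 := by
      have h := asc_chain array (ascN array i - 1) i (by omega)
      have e1 : i + (ascN array i - 1) = i + ascN array i - 1 := by omega
      have e2 : i + (ascN array i - 1) + 1 = i + ascN array i := by omega
      rw [e2, e1] at h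
      exact h
    have hmem : i + ascN array i ∈ List.range' 1 (array.length - 2) := by
      rw [List.mem_range'_1]
      omega
    have hlasc : ascN array i ≤ lascN array (i + ascN array i) := by
      apply lasc_ge array (ascN array i) (i + ascN array i) (by omega)
      intro j hj
      have h := asc_chain array (ascN array i - 1 - j) i (by omega)
      have e1 : i + (ascN array i - 1 - j) = i + ascN array i - j - 1 := by omega
      have e2 : i + (ascN array i - 1 - j) + 1 = i + ascN array i - j := by omega
      rw [e2, e1] at h
      exact h
    have hBle := le_condmax
      (fun t => array.getD (t - 1) 0 < array.getD t 0 ∧ array.getD t 0 > array.getD (t + 1) 0)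
      (fun t => lascN array t + descN array t + 1)
      (List.range' 1 (array.length - 2)) 0 hmem ⟨htip1, hdc.2⟩
    dsimp only at hBle
    omega
  · rw [condmax_le_iff]
    refine ⟨Nat.zero_le _, ?_⟩
    intro t ht hp
    obtain ⟨hp1, hp2⟩ := hp
    have htr := List.mem_range'_1.1 ht
    have htn : t < array.length := by omega
    have hm1 : 0 < lascN array t := by
      rw [lasc_succ array t (by omega) hp1]
      omega
    have hasct : ascN array t = 0 := by
      rw [ascN, dif_neg (by rintro ⟨_, hcc⟩; exact absurd hcc (by omega))]
    have hL2 := lasc_to_asc array (lascN array t) t htn rfl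
    rw [hasct] at hL2
    have hle := lascN_le array t
    have hiasc : ascN array (t - lascN array t) = lascN array t := by omega
    have hti : t - lascN array t + ascN array (t - lascN array t) = t := by omega
    have hdt : 0 < descN array t := (desc_pos_iff array t).2 ⟨by omega, hp2⟩
    have himem : t - lascN array t ∈ List.range (array.length - 2) := List.mem_range.2 (by omega)
    have hAle := le_condmax
      (fun i => 0 < ascN array i ∧ 0 < descN array (i + ascN array i))
      (fun i => 1 + ascN array i + descN array (i + ascN array i))
      (List.range (array.length - 2)) 0 himem
      ⟨by omega, by rw [hti]; exact hdt⟩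
    dsimp only at hAle
    rw [hti, hiasc] at hAle
    omega
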